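-- pv_equiv track=rewrite | github.com/flame4343/Voice-Prompt-Generation | code/2_Keyphrase Predictor/dataset.py | combine_source_elements
-- ===== SOURCE A (Python) =====
-- def combine_source_elements(source_dict, separator=" [SEP] "):
--     """
--     Combines source elements into a single string and records positions.
--     """
--     combined = ""
--     positions = []
--     current_pos = 0
--     for key, value in source_dict.items():
--         element = f"{key}: {value}"
--         if combined:
--             combined += separator
--             current_pos += len(separator)
--         combined += element
--         start, end = current_pos, current_pos + len(element)
--         positions.append((element, start, end))
--         current_pos = end
--     return combined, positions
-- ===== SOURCE B (Python) =====
-- def combine_source_elements(source_dict, separator=" [SEP] "):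
--     """
--     Two-pass variant: build the element strings, join them, then compute
--     positions by a prefix-sum offset walk (offset advances by len(element)
--     plus the separator length after every element).
--     """
--     elements = [f"{key}: {value}" for key, value in source_dict.items()]
--     combined = separator.join(elements)
--     positions = []
--     offset = 0
--     step = len(separator)
--     for element in elements:
--         end = offset + len(element)
--         positions.append((element, offset, end))
--         offset = end + step
--     return combined, positions
-- ===== Notes on version B (the rewrite author's own statement) =====
-- stated objective: simpler
-- what changed: Replaces A's single loop that interleaves string concatenation with position bookkeeping (guarded by a non-empty test on the accumulated string) by two decoupled passes: a comprehension plus separator.join builds the string, and an unconditional prefix-sum offset walk (offset advances by len(element)+len(separator) after every element) computes the positions.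
import Mathlib
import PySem

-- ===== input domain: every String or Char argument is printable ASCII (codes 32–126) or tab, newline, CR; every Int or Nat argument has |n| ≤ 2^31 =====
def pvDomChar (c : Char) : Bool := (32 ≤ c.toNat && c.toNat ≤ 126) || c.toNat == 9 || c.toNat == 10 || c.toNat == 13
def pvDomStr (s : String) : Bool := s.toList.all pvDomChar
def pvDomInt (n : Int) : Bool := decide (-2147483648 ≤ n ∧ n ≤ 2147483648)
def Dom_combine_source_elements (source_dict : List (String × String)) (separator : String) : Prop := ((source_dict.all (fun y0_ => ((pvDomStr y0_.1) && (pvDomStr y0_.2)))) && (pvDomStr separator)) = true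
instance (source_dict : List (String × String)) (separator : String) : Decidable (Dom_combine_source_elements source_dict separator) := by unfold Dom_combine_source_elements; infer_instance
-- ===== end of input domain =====

-- B decouples string assembly (separator.join) from position bookkeeping (a prefix-sum
-- offset walk with no first-element conditional); objective: simpler, same O(n) cost.

-- ===== PORT A =====
-- one step of A's loop over (combined, positions, current_pos); the separator is
-- appended (and current_pos advanced) exactly when combined is non-empty
def cseStepA (separator : String) (acc : String × List (String × Int × Int) × Int) (kv : String × String) : String × List (String × Int × Int) × Int :=
  let element := kv.1 ++ ": " ++ kv.2
  let (combined, current_pos) :=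
    if acc.1 ≠ "" then (acc.1 ++ separator, acc.2.2 + PySem.Str.len separator)
    else (acc.1, acc.2.2)
  let combined := combined ++ element
  let start := current_pos
  let stop := current_pos + PySem.Str.len element
  (combined, acc.2.1 ++ [(element, start, stop)], stop)

def combine_source_elements (source_dict : List (String × String)) (separator : String) : String × (List (String × Int × Int)) :=
  let st := source_dict.foldl (cseStepA separator) ("", ([], 0))
  (st.1, st.2.1)

-- ===== PORT B =====
-- one step of B's offset walk: emit (element, offset, end), advance by len(element) + step
def cseStepB (separator : String) (acc : List (String × Int × Int) × Int) (element : String) : List (String × Int × Int) × Int :=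
  let stop := acc.2 + PySem.Str.len element
  (acc.1 ++ [(element, acc.2, stop)], stop + PySem.Str.len separator)

def combine_source_elements_alt (source_dict : List (String × String)) (separator : String) : String × (List (String × Int × Int)) :=
  let elements := source_dict.map (fun kv => kv.1 ++ ": " ++ kv.2)
  let combined := PySem.Str.join separator elements
  let positions := (elements.foldl (cseStepB separator) ([], 0)).1
  (combined, positions)

-- ===== PRECONDITION & SPEC =====
def Spec_combine_source_elements (source_dict : List (String × String)) (separator : String) (out : String × (List (String × Int × Int))) : Prop := out = combine_source_elements_alt source_dict separator
instance (source_dict : List (String × String)) (separator : String) (out : String × (List (String × Int × Int))) : Decidable (Spec_combine_source_elements source_dict separator out) := by unfold Spec_combine_source_elements; infer_instance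

-- ===== CLAIM (what is proved, stated in full; the proofs are below) =====
def Claim_equal_combine_source_elements : Prop := ∀ (source_dict : List (String × String)) (separator : String), Dom_combine_source_elements source_dict separator → Spec_combine_source_elements source_dict separator (combine_source_elements source_dict separator)

-- ===== LEMMAS AND PROOFS =====

-- the element string of one pair
def cseElt (kv : String × String) : String := kv.1 ++ ": " ++ kv.2

-- the tail of the combined string after the first element
def cseTailC (separator : String) : List (String × String) → String
  | [] => ""
  | kv :: t => separator ++ (cseElt kv ++ cseTailC separator t)

-- the positions A's loop emits after the first element, starting from current_pos = pos
def cseTailP (separator : String) (pos : Int) : List (String × String) → List (String × Int × Int)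
  | [] => []
  | kv :: t =>
      (cseElt kv, pos + PySem.Str.len separator,
        pos + PySem.Str.len separator + PySem.Str.len (cseElt kv)) ::
      cseTailP separator (pos + PySem.Str.len separator + PySem.Str.len (cseElt kv)) t

-- total advance of current_pos over the tail
def cseTailLen (separator : String) : List (String × String) → Int
  | [] => 0
  | kv :: t => PySem.Str.len separator + PySem.Str.len (cseElt kv) + cseTailLen separator t

lemma cseElt_ne_empty (kv : String × String) : cseElt kv ≠ "" := by
  intro h
  have := congrArg String.toList h
  simp [cseElt] at this

lemma append_ne_empty_left {s : String} (t : String) (h : s ≠ "") : s ++ t ≠ "" := by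
  intro he
  apply h
  have := congrArg String.toList he
  simp at this
  exact String.toList_inj.mp (by simp [this.1])

lemma cseStepA_of_ne (separator : String) (c : String) (ps : List (String × Int × Int)) (pos : Int) (kv : String × String) (h : c ≠ "") :
    cseStepA separator (c, ps, pos) kv
      = (c ++ separator ++ cseElt kv,
          ps ++ [(cseElt kv, pos + PySem.Str.len separator,
            pos + PySem.Str.len separator + PySem.Str.len (cseElt kv))],
          pos + PySem.Str.len separator + PySem.Str.len (cseElt kv)) := by
  simp [cseStepA, cseElt, h, String.append_assoc]

-- A's loop continued from a non-empty combined string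
lemma cse_loopA (separator : String) (l : List (String × String)) :
    ∀ (c : String) (ps : List (String × Int × Int)) (pos : Int), c ≠ "" →
    l.foldl (cseStepA separator) (c, ps, pos)
      = (c ++ cseTailC separator l, ps ++ cseTailP separator pos l, pos + cseTailLen separator l) := by
  induction l with
  | nil => intro c ps pos h; simp [cseTailC, cseTailP, cseTailLen]
  | cons kv t ih =>
      intro c ps pos h
      rw [List.foldl_cons, cseStepA_of_ne separator c ps pos kv h,
        ih _ _ _ (append_ne_empty_left _ (append_ne_empty_left _ h))]
      simp [cseTailC, cseTailP, cseTailLen, String.append_assoc]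
      ring

-- B's offset walk appends to its accumulator
lemma cse_loopB (separator : String) (es : List String) :
    ∀ (ps : List (String × Int × Int)) (o : Int),
    (es.foldl (cseStepB separator) (ps, o)).1
      = ps ++ (es.foldl (cseStepB separator) ([], o)).1 := by
  induction es with
  | nil => intro ps o; simp
  | cons e t ih =>
      intro ps o
      rw [List.foldl_cons, List.foldl_cons]
      simp only [cseStepB, List.nil_append]
      rw [ih, ih [(e, o, o + PySem.Str.len e)]]
      simp

-- B's offset walk over the mapped tail, started one separator later, is A's tail positions
lemma cse_posB_eq_tailP (separator : String) (t : List (String × String)) :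
    ∀ (pos : Int),
    ((t.map cseElt).foldl (cseStepB separator) ([], pos + PySem.Str.len separator)).1
      = cseTailP separator pos t := by
  induction t with
  | nil => intro pos; simp [cseTailP]
  | cons kv t ih =>
      intro pos
      rw [List.map_cons, List.foldl_cons]
      simp only [cseStepB]
      rw [cse_loopB]
      have : pos + PySem.Str.len separator + PySem.Str.len (cseElt kv) + PySem.Str.len separator
          = (pos + PySem.Str.len separator + PySem.Str.len (cseElt kv)) + PySem.Str.len separator := by ring
      rw [this, ih (pos + PySem.Str.len separator + PySem.Str.len (cseElt kv))]
      simp [cseTailP]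

-- separator.join of the element strings equals first element ++ A's tail string
lemma cse_join_eq (separator : String) (kv : String × String) (t : List (String × String)) :
    PySem.Str.join separator (cseElt kv :: t.map cseElt) = cseElt kv ++ cseTailC separator t := by
  induction t generalizing kv with
  | nil =>
      apply String.toList_inj.mp
      simp [PySem.Str.toList_join, PySem.Chars.join_singleton, cseTailC]
  | cons kv2 t ih =>
      apply String.toList_inj.mp
      rw [List.map_cons, PySem.Str.toList_join, List.map_cons, List.map_cons,
        PySem.Chars.join_cons_cons]
      have h2 := congrArg String.toList (ih kv2)
      rw [PySem.Str.toList_join] at h2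
      simp only [List.map_cons, List.map_map] at h2
      simp [cseTailC, h2]

-- ===== VERDICT (by name: the statement is the Claim_ definition above) =====
theorem combine_source_elements_spec : Claim_equal_combine_source_elements := by
  intro sd sep _
  unfold Spec_combine_source_elements
  cases sd with
  | nil =>
      apply Prod.ext
      · apply String.toList_inj.mp
        simp [combine_source_elements, combine_source_elements_alt,
          PySem.Str.toList_join, PySem.Chars.join_nil]
      · rfl
  | cons kv t =>
      have hfirst : cseStepA sep ("", ([], 0)) kv = (cseElt kv, [(cseElt kv, 0, PySem.Str.len (cseElt kv))], PySem.Str.len (cseElt kv)) := by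
        simp [cseStepA, cseElt]
      unfold combine_source_elements combine_source_elements_alt
      simp only [List.foldl_cons, List.map_cons, hfirst]
      rw [cse_loopA sep t (cseElt kv) _ _ (cseElt_ne_empty kv)]
      apply Prod.ext
      · exact (cse_join_eq sep kv t).symm
      · show _ = ((cseElt kv :: t.map cseElt).foldl (cseStepB sep) ([], 0)).1
        rw [List.foldl_cons]
        simp only [cseStepB]
        rw [cse_loopB]
        simp only [zero_add]
        rw [cse_posB_eq_tailP sep t (PySem.Str.len (cseElt kv))]
        simp [cseElt]
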